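-- pv_equiv track=rewrite | github.com/shan-mathi/Codeforces | 447B - DZY Loves Strings.py | stupid_strings
-- ===== SOURCE A (Python) =====
-- import string
--
-- def stupid_strings(s,n,w):
--     l = len(s)
--     ans=0
--     for i,v in enumerate(s):
--         ans+=(i+1)*(w[string.ascii_lowercase.index(v)])
--     for i in range(n):
--         ans+=max(w)*(l + i + 1)
--     #e = (l*(l + 2*n +1 )//2)*max(w)
--     return ans
-- ===== SOURCE B (Python) =====
-- def stupid_strings(s, n, w):
--     # accumulate, per letter, the sum of (1-based) positions where it occurs
--     pos_sum = [0] * 26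
--     for p, c in enumerate(s, 1):
--         pos_sum[ord(c) - 97] += p
--     ans = sum(ps * wt for ps, wt in zip(pos_sum, w))
--     if n > 0:
--         ans += max(w) * (n * len(s) + n * (n + 1) // 2)
--     return ans
-- ===== Notes on version B (the rewrite author's own statement) =====
-- stated objective: faster
-- what changed: B builds a 26-slot per-letter position-sum table in one pass over s and takes the dot product with w (removing the per-character alphabet scan of string.index), and replaces the range(n) loop that recomputes max(w) every iteration by one max(w) times the closed-form series n*len(s)+n*(n+1)//2.
import Mathlib
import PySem

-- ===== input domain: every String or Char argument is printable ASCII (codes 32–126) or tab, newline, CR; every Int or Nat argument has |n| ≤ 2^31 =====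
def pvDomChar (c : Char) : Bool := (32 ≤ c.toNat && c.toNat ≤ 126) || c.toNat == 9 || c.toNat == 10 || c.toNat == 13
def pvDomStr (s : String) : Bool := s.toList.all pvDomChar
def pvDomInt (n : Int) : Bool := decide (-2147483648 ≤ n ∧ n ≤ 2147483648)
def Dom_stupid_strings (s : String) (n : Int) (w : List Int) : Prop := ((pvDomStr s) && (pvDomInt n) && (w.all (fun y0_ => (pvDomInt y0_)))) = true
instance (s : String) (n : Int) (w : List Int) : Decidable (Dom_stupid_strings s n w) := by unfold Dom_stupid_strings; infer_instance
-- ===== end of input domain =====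

-- B builds a 26-slot per-letter position-sum table in one pass and dots it with w,
-- and replaces the range(n) loop (which recomputes max(w) each iteration) by one
-- max(w) times the closed-form series (objective: faster).

-- ===== PORT A =====
-- string.ascii_lowercase.index(v): List.index? on the alphabet's character list
-- (getD is exact under Pre_, which guarantees v is a lowercase letter);
-- w[...] is pyGet? (getD exact under Pre_: index in range); max(w) is max? (getD
-- exact under Pre_: w ≠ [] whenever the range(n) loop runs).
def stupid_strings (s : String) (n : Int) (w : List Int) : Int :=
  let l : Int := PySem.Str.len s
  let ans : Int := (PySem.List.enumerate s.toList 0).foldl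
    (fun ans iv => ans + (iv.1 + 1) *
      ((PySem.List.pyGet? w
        (((PySem.List.index? "abcdefghijklmnopqrstuvwxyz".toList iv.2).getD 0 : Nat) : Int)).getD 0)) 0
  (PySem.List.pyRange 0 n 1).foldl
    (fun ans i => ans + ((PySem.List.max? w (fun x => x)).getD 0) * (l + i + 1)) ans

-- ===== PORT B =====
-- pos_sum[ord(c)-97] += p: the index ord(c)-97 is a Nat subtraction / List.set+getD,
-- exact under Pre_ (every c is a lowercase letter, so 0 ≤ ord(c)-97 < 26);
-- zip truncates exactly as Python's zip; max(w)/floordiv as in Python.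
def stupid_strings_alt (s : String) (n : Int) (w : List Int) : Int :=
  let init : List Int := List.replicate 26 0
  let posSum : List Int := (PySem.List.enumerate s.toList 1).foldl
    (fun acc pc => acc.set (pc.2.toNat - 97) (acc.getD (pc.2.toNat - 97) 0 + pc.1)) init
  let ans : Int := ((posSum.zip w).map (fun q => q.1 * q.2)).sum
  if 0 < n then
    ans + ((PySem.List.max? w (fun x => x)).getD 0) *
      (n * PySem.Str.len s + PySem.Int.floordiv (n * (n + 1)) 2)
  else ans

-- ===== PRECONDITION & SPEC =====
-- Exactly where Python A returns: every character of s is a lowercase letter whose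
-- alphabet index is a valid index of w (else ValueError/IndexError), and w is
-- nonempty whenever the range(n) loop runs at least once (else max([]) raises).
def Pre_stupid_strings (s : String) (n : Int) (w : List Int) : Prop :=
  (s.toList.all (fun c => decide ('a' ≤ c ∧ c ≤ 'z' ∧ (c.toNat : Int) - 97 < w.length))) = true
    ∧ (1 ≤ n → w ≠ [])
instance (s : String) (n : Int) (w : List Int) : Decidable (Pre_stupid_strings s n w) := by
  unfold Pre_stupid_strings; infer_instance

def pvWitness_stupid_strings : String × Int × List Int := ("ab", 1, [3, 4])

def Spec_stupid_strings (s : String) (n : Int) (w : List Int) (out : Int) : Prop := out = stupid_strings_alt s n w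
instance (s : String) (n : Int) (w : List Int) (out : Int) : Decidable (Spec_stupid_strings s n w out) := by unfold Spec_stupid_strings; infer_instance

-- ===== CLAIM (what is proved, stated in full; the proofs are below) =====
def Claim_equal_stupid_strings : Prop := ∀ (s : String) (n : Int) (w : List Int), Dom_stupid_strings s n w → Pre_stupid_strings s n w → Spec_stupid_strings s n w (stupid_strings s n w)

-- ===== LEMMAS AND PROOFS =====

-- the alphabet index of a lowercase letter is its code point minus 97
lemma idx_alpha (c : Char) (h1 : 'a' ≤ c) (h2 : c ≤ 'z') :
    PySem.List.index? "abcdefghijklmnopqrstuvwxyz".toList c = some (c.toNat - 97) := by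
  have hb1 : 97 ≤ c.toNat := h1
  have hb2 : c.toNat ≤ 122 := h2
  have hc : c = Char.ofNat c.toNat := (Char.ofNat_toNat c).symm
  set m := c.toNat with hm
  interval_cases m <;> rw [hc] <;> decide

-- updating slot k of the left list shifts the zip-dot-product by p * v[k]
lemma dot_set (p : Int) : ∀ (k : Nat) (l v : List Int), k < l.length → k < v.length →
    (((l.set k (l.getD k 0 + p)).zip v).map (fun q => q.1 * q.2)).sum
      = ((l.zip v).map (fun q => q.1 * q.2)).sum + p * v.getD k 0 := by
  intro k
  induction k with
  | zero =>
    intro l v hl hv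
    match l, v with
    | a :: l', b :: v' => simp [List.getD]; ring
  | succ k ih =>
    intro l v hl hv
    match l, v with
    | a :: l', b :: v' =>
      simp only [List.set, List.zip_cons_cons, List.map_cons, List.sum_cons,
        List.getD_cons_succ]
      rw [ih l' v' (by simpa using hl) (by simpa using hv)]
      ring

-- the position-sum fold followed by the dot product equals the direct weighted sum
lemma fold_dot (w : List Int) : ∀ (chars : List Char) (st : Int) (l : List Int),
    l.length = 26 →
    (∀ c ∈ chars, 97 ≤ c.toNat ∧ c.toNat ≤ 122 ∧ c.toNat - 97 < w.length) →
    ((((PySem.List.enumerate chars st).foldl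
        (fun acc pc => acc.set (pc.2.toNat - 97) (acc.getD (pc.2.toNat - 97) 0 + pc.1)) l).zip w).map
      (fun q => q.1 * q.2)).sum
    = ((l.zip w).map (fun q => q.1 * q.2)).sum
      + ((PySem.List.enumerate chars st).map (fun pc => pc.1 * w.getD (pc.2.toNat - 97) 0)).sum := by
  intro chars
  induction chars with
  | nil => intro st l _ _; simp [PySem.List.enumerate_nil]
  | cons c rest ih =>
    intro st l hlen hch
    obtain ⟨h97, h122, hw⟩ := hch c (List.mem_cons_self)
    simp only [PySem.List.enumerate_cons, List.foldl_cons, List.map_cons, List.sum_cons]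
    rw [ih (st + 1) _ (by simpa [List.length_set] using hlen)
        (fun d hd => hch d (List.mem_cons_of_mem _ hd))]
    rw [dot_set st (c.toNat - 97) l w (by omega) hw]
    ring

-- shifting the enumerate start absorbs the '+ 1' in the weight factor
lemma enum_shift (g : Char → Int) : ∀ (chars : List Char) (st : Int),
    ((PySem.List.enumerate chars st).map (fun pc => (pc.1 + 1) * g pc.2)).sum
      = ((PySem.List.enumerate chars (st + 1)).map (fun pc => pc.1 * g pc.2)).sum := by
  intro chars
  induction chars with
  | nil => intro st; simp [PySem.List.enumerate_nil]
  | cons c rest ih =>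
    intro st
    simp only [PySem.List.enumerate_cons, List.map_cons, List.sum_cons]
    rw [ih (st + 1)]

-- arithmetic-series closed form for A's second loop
lemma loop2 (m l A : Int) : ∀ (N : Nat),
    (PySem.List.pyRange 0 (N : Int) 1).foldl (fun a i => a + m * (l + i + 1)) A
      = A + m * ((N : Int) * l + ((N : Int) * ((N : Int) + 1)) / 2) := by
  intro N
  induction N with
  | zero => simp [PySem.List.pyRange_one_eq_nil]
  | succ k ih =>
    have h : (((k : Nat) + 1 : Nat) : Int) = (k : Int) + 1 := by push_cast; ring
    rw [h, PySem.List.pyRange_one_succ_right (by positivity), List.foldl_append, ih]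
    simp only [List.foldl_cons, List.foldl_nil]
    have hK : 0 ≤ (k : Int) * ((k : Int) + 1) := by positivity
    have heq : ((k : Int) + 1) * (((k : Int) + 1) + 1) = (k : Int) * ((k : Int) + 1) + 2 * ((k : Int) + 1) := by ring
    have hdiv : ((k : Int) + 1) * (((k : Int) + 1) + 1) / 2
        = (k : Int) * ((k : Int) + 1) / 2 + ((k : Int) + 1) := by omega
    rw [hdiv]; ring

-- ===== VERDICT (by name: the statement is the Claim_ definition above) =====
theorem stupid_strings_spec : Claim_equal_stupid_strings := by
  intro s n w _ hpre
  obtain ⟨hch', hmax⟩ := hpre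
  have hch : ∀ c ∈ s.toList, 97 ≤ c.toNat ∧ c.toNat ≤ 122 ∧ c.toNat - 97 < w.length := by
    intro c hc
    have := of_decide_eq_true (List.all_eq_true.mp hch' c hc)
    obtain ⟨h1, h2, h3⟩ := this
    have hb1 : 97 ≤ c.toNat := h1
    have hb2 : c.toNat ≤ 122 := h2
    exact ⟨hb1, hb2, by omega⟩
  unfold Spec_stupid_strings stupid_strings stupid_strings_alt
  simp only []
  -- first loop of A = dot product of B
  have h1 : (PySem.List.enumerate s.toList 0).foldl
      (fun ans iv => ans + (iv.1 + 1) *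
        ((PySem.List.pyGet? w
          (((PySem.List.index? "abcdefghijklmnopqrstuvwxyz".toList iv.2).getD 0 : Nat) : Int)).getD 0)) 0
      = ((((PySem.List.enumerate s.toList 1).foldl
          (fun acc pc => acc.set (pc.2.toNat - 97) (acc.getD (pc.2.toNat - 97) 0 + pc.1))
          (List.replicate 26 0)).zip w).map (fun q => q.1 * q.2)).sum := by
    rw [PySem.List.foldl_add]
    rw [fold_dot w s.toList 1 (List.replicate 26 0) (by simp) hch]
    have hzero : (((List.replicate 26 (0 : Int)).zip w).map (fun q => q.1 * q.2)).sum = 0 := by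
      have : ∀ q ∈ ((List.replicate 26 (0 : Int)).zip w), q.1 * q.2 = 0 := by
        intro q hq
        have := List.of_mem_zip hq
        have h0 : q.1 = 0 := List.eq_of_mem_replicate this.1
        simp [h0]
      calc (((List.replicate 26 (0 : Int)).zip w).map (fun q => q.1 * q.2)).sum
          = (((List.replicate 26 (0 : Int)).zip w).map (fun _ => (0 : Int))).sum := by
            rw [List.map_congr_left this]
        _ = 0 := by simp
    rw [hzero, zero_add]
    have hmapc : (PySem.List.enumerate s.toList 0).map
        (fun iv => (iv.1 + 1) *
          ((PySem.List.pyGet? w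
            (((PySem.List.index? "abcdefghijklmnopqrstuvwxyz".toList iv.2).getD 0 : Nat) : Int)).getD 0))
        = (PySem.List.enumerate s.toList 0).map
          (fun iv => (iv.1 + 1) * w.getD (iv.2.toNat - 97) 0) := by
      apply List.map_congr_left
      intro p hp
      have hc : p.2 ∈ s.toList := by
        have := PySem.List.map_snd_enumerate s.toList 0
        exact this ▸ List.mem_map_of_mem hp
      obtain ⟨h97, h122, hw⟩ := hch p.2 hc
      rw [idx_alpha p.2 (by exact h97) (by exact h122)]
      simp
    rw [hmapc, enum_shift (fun c => w.getD (c.toNat - 97) 0) s.toList 0]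
    simp
  rw [h1]
  -- second loop of A = closed-form series of B
  by_cases hn : 0 < n
  · have hnn : n = ((n.toNat : Nat) : Int) := by omega
    rw [if_pos hn]
    rw [show PySem.Int.floordiv (n * (n + 1)) 2 = (n * (n + 1)) / 2 from
      PySem.Int.floordiv_eq_ediv_of_pos (by omega), hnn, loop2]
  · rw [if_neg hn, PySem.List.pyRange_one_eq_nil (by omega)]
    simp
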